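-- pv_equiv track=rewrite | github.com/B-Borecki/seu-injection-lab | analyze_seu.py | window_counts
-- ===== SOURCE A (Python) =====
-- def window_counts(seqs: list[int], flags: list[int], win: int) -> tuple[list[int], list[int]]:
--     bins = {}
--     for s, fl in zip(seqs, flags):
--         if s == 0:
--             continue
--         end = ((s + win - 1) // win) * win
--         bins[end] = bins.get(end, 0) + int(fl)
--     xs = sorted(bins.keys())
--     ys = [bins[x] for x in xs]
--     return xs, ys
-- ===== SOURCE B (Python) =====
-- def window_counts(seqs: list[int], flags: list[int], win: int) -> tuple[list[int], list[int]]: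
--     pairs = [(((s + win - 1) // win) * win, int(fl)) for s, fl in zip(seqs, flags) if s != 0]
--     pairs.sort(key=lambda p: p[0])
--     xs, ys = [], []
--     have = False
--     cur = tot = 0
--     for e, f in pairs:
--         if have and e == cur:
--             tot += f
--         else:
--             if have:
--                 xs.append(cur)
--                 ys.append(tot)
--             cur, tot, have = e, f, True
--     if have:
--         xs.append(cur)
--         ys.append(tot)
--     return xs, ys
-- ===== Notes on version B (the rewrite author's own statement) =====
-- stated objective: alternative
-- what changed: Replaced A's dict aggregation (bins dict built per pair, then sorted keys and per-key lookups) by building the (window-end, flag) pair list, sorting it by window end, and summing adjacent equal-end runs in one grouping pass.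
import Mathlib
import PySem

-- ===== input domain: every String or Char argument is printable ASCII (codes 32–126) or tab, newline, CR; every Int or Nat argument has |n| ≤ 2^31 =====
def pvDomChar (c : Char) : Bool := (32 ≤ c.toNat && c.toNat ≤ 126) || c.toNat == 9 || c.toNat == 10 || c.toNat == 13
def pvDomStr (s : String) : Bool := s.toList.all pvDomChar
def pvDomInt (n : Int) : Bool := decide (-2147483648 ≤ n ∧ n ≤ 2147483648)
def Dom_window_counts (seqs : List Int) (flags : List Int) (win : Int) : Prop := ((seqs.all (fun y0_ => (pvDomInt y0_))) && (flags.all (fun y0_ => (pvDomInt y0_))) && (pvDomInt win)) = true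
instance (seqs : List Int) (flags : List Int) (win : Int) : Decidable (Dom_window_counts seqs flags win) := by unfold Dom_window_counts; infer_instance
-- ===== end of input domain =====

-- B replaces A's dict aggregation (bins dict, then sorted keys + lookups) by building the
-- (window-end, flag) pair list, sorting it by window end, and grouping adjacent equal ends
-- in one pass: an alternative (sort-then-group) algorithm of similar cost.


-- ===== PORT A =====
-- end = ((s + win - 1) // win) * win  (Python floor division)
def pvEnd (s win : Int) : Int := PySem.Int.floordiv (s + win - 1) win * win

def window_counts (seqs : List Int) (flags : List Int) (win : Int) : List Int × List Int :=
  let bins : PySem.Dict Int Int :=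
    (seqs.zip flags).foldl
      (fun d p =>
        if p.1 == 0 then d
        else d.insert (pvEnd p.1 win) (d.getD (pvEnd p.1 win) 0 + p.2))
      PySem.Dict.empty
  let xs := PySem.List.sorted bins.keys (fun x => x)
  -- bins[x] with x drawn from bins.keys: the key is always present, so getD x 0 is exact
  let ys := xs.map (fun x => bins.getD x 0)
  (xs, ys)

-- ===== PORT B =====
-- the for-loop over the sorted pairs: (cur, tot) is the open run; emit (cur, tot) when the key changes
def pvGroupLoop : List (Int × Int) → Int → Int → List Int × List Int
  | [], cur, tot => ([cur], [tot])
  | (e, f) :: rest, cur, tot =>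
    if e == cur then pvGroupLoop rest cur (tot + f)
    else
      let (xs, ys) := pvGroupLoop rest e f
      (cur :: xs, tot :: ys)

-- have = False until the first pair is seen; then the loop above runs
def pvGroup : List (Int × Int) → List Int × List Int
  | [] => ([], [])
  | (e, f) :: rest => pvGroupLoop rest e f

def window_counts_alt (seqs : List Int) (flags : List Int) (win : Int) : List Int × List Int :=
  let pairs := ((seqs.zip flags).filter (fun p => p.1 != 0)).map (fun p => (pvEnd p.1 win, p.2))
  pvGroup (PySem.List.sorted pairs (fun p => p.1))

-- ===== PRECONDITION & SPEC =====
-- Pre_ excludes exactly the inputs where Python raises ZeroDivisionError: win = 0 while some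
-- zipped pair has s ≠ 0 (both A and B raise there).
def Pre_window_counts (seqs : List Int) (flags : List Int) (win : Int) : Prop :=
  win ≠ 0 ∨ ∀ p ∈ seqs.zip flags, p.1 = 0
instance (seqs : List Int) (flags : List Int) (win : Int) : Decidable (Pre_window_counts seqs flags win) := by unfold Pre_window_counts; infer_instance

def pvWitness_window_counts : List Int × List Int × Int := ([1, 5, 6, -3], [1, 2, 3, 1], 5)

def Spec_window_counts (seqs : List Int) (flags : List Int) (win : Int) (out : List Int × List Int) : Prop := out = window_counts_alt seqs flags win
instance (seqs : List Int) (flags : List Int) (win : Int) (out : List Int × List Int) : Decidable (Spec_window_counts seqs flags win out) := by unfold Spec_window_counts; infer_instance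

-- ===== CLAIM (what is proved, stated in full; the proofs are below) =====
def Claim_equal_window_counts : Prop := ∀ (seqs : List Int) (flags : List Int) (win : Int), Dom_window_counts seqs flags win → Pre_window_counts seqs flags win → Spec_window_counts seqs flags win (window_counts seqs flags win)

-- ===== LEMMAS AND PROOFS =====

-- the flag sum of the bin k in a pair list
def pvSum (l : List (Int × Int)) (k : Int) : Int :=
  ((l.filter (fun p => p.1 == k)).map (fun p => p.2)).sum

lemma pvSum_nil (k : Int) : pvSum [] k = 0 := rfl

lemma pvSum_cons (e f : Int) (l : List (Int × Int)) (k : Int) :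
    pvSum ((e, f) :: l) k = (if k = e then f else 0) + pvSum l k := by
  simp only [pvSum, List.filter_cons]
  by_cases h : e = k
  · subst h; simp
  · simp [h, Ne.symm h]

lemma pvSum_eq_zero (l : List (Int × Int)) (k : Int) (h : ∀ p ∈ l, p.1 ≠ k) :
    pvSum l k = 0 := by
  have : l.filter (fun p => p.1 == k) = [] := by
    simp [List.filter_eq_nil_iff]; exact fun a b hab => h (a, b) hab
  simp [pvSum, this]

-- A's loop with the `s == 0: continue` skip equals the fold over B's filtered-mapped pair list
lemma pvFoldA (l : List (Int × Int)) (win : Int) (d : PySem.Dict Int Int) :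
    l.foldl
      (fun d p =>
        if p.1 == 0 then d
        else d.insert (pvEnd p.1 win) (d.getD (pvEnd p.1 win) 0 + p.2)) d
    = ((l.filter (fun p => p.1 != 0)).map (fun p => (pvEnd p.1 win, p.2))).foldl
        (fun d q => d.insert q.1 (d.getD q.1 0 + q.2)) d := by
  induction l generalizing d with
  | nil => rfl
  | cons p t ih =>
    simp only [List.foldl_cons, List.filter_cons]
    by_cases h : p.1 = 0
    · simpa [h, bne] using ih d
    · simpa [h, bne] using ih (d.insert (pvEnd p.1 win) (d.getD (pvEnd p.1 win) 0 + p.2))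

-- lookups in the aggregation dict are the flag sums
lemma pvGetD_foldA (l : List (Int × Int)) (d : PySem.Dict Int Int) (k : Int) :
    (l.foldl (fun d q => d.insert q.1 (d.getD q.1 0 + q.2)) d).getD k 0
    = d.getD k 0 + pvSum l k := by
  induction l generalizing d with
  | nil => simp [pvSum_nil]
  | cons q t ih =>
    obtain ⟨e, f⟩ := q
    rw [List.foldl_cons, ih, pvSum_cons]
    by_cases h : k = e
    · simp [h]; ring
    · simp [PySem.Dict.getD_insert, h]

-- Set.ofList of a list is a sublist of it
lemma pvOfList_sublist_aux {α : Type} [BEq α] (xs acc : List α) :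
    (xs.foldl PySem.Set.add acc).Sublist (acc ++ xs) := by
  induction xs generalizing acc with
  | nil => simp
  | cons x t ih =>
    simp only [List.foldl_cons, PySem.Set.add]
    by_cases h : PySem.Set.contains acc x = true
    · rw [if_pos h]
      exact (ih acc).trans (List.Sublist.append_left (t.sublist_cons_self x) acc)
    · rw [if_neg h]
      simpa using ih (acc ++ [x])

lemma pvOfList_sublist {α : Type} [BEq α] (xs : List α) :
    (PySem.Set.ofList xs).Sublist xs := by
  simpa using (PySem.Set.ofList_eq_foldl xs ▸ pvOfList_sublist_aux xs [])

lemma pvOfList_cons_of_not_mem (x : Int) (xs : List Int) (h : x ∉ xs) :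
    PySem.Set.ofList (x :: xs) = x :: PySem.Set.ofList xs := by
  rw [PySem.Set.ofList_cons]
  congr 1
  have hx : x ∉ PySem.Set.ofList xs := by
    rw [PySem.Set.mem_ofList]; exact h
  simp only [PySem.Set.discard]
  apply List.filter_eq_self.2
  intro a ha
  have : a ≠ x := fun hax => hx (hax ▸ ha)
  simpa using this

lemma pvOfList_cons_self (x : Int) (xs : List Int) :
    PySem.Set.ofList (x :: x :: xs) = PySem.Set.ofList (x :: xs) := by
  simp [PySem.Set.ofList_eq_foldl, PySem.Set.add, List.contains_eq_mem]

-- the grouping loop on a (by first component) nondecreasing list produces the distinct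
-- keys in order and, for each, the flag sum (the open run (cur, tot) prepended)
lemma pvGroupLoop_spec (l : List (Int × Int)) (cur tot : Int)
    (h : List.Pairwise (fun a b => a ≤ b) (cur :: l.map (fun p => p.1))) :
    pvGroupLoop l cur tot =
      (PySem.Set.ofList (cur :: l.map (fun p => p.1)),
       (PySem.Set.ofList (cur :: l.map (fun p => p.1))).map
         (fun k => (if k = cur then tot else 0) + pvSum l k)) := by
  induction l generalizing cur tot with
  | nil =>
    simp [pvGroupLoop, PySem.Set.ofList, PySem.Set.add, pvSum_nil]
  | cons q t ih =>
    obtain ⟨e, f⟩ := q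
    by_cases he : e = cur
    · subst he
      have h' : List.Pairwise (fun a b => a ≤ b) (e :: t.map (fun p => p.1)) := by
        have := h.sublist (List.Sublist.cons₂ e (List.sublist_cons_self e _))
        exact this
      rw [show pvGroupLoop ((e, f) :: t) e tot = pvGroupLoop t e (tot + f) by
        simp [pvGroupLoop]]
      rw [ih e (tot + f) h']
      simp only [List.map_cons, pvOfList_cons_self]
      refine Prod.ext rfl ?_
      apply List.map_congr_left
      intro k _
      rw [pvSum_cons]
      by_cases hk : k = e
      · simp [hk]; ring
      · simp [hk]
    · -- key changes: cur < e ≤ every later key, so cur is fresh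
      have hce : cur ≤ e := by
        have := List.pairwise_cons.1 h
        exact this.1 e (by simp)
      have hlt : cur < e := lt_of_le_of_ne hce (fun hh => he hh.symm)
      have htail : List.Pairwise (fun a b => a ≤ b) (e :: t.map (fun p => p.1)) := by
        have := List.pairwise_cons.1 h
        simpa using this.2
      have hfresh : cur ∉ (e :: t.map (fun p => p.1)) := by
        intro hmem
        rcases List.mem_cons.1 hmem with hh | hh
        · exact absurd hh (ne_of_lt hlt)
        · have : e ≤ cur := ((List.pairwise_cons.1 htail).1 cur hh)
          exact absurd (lt_of_lt_of_le hlt this) (lt_irrefl cur)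
      rw [show pvGroupLoop ((e, f) :: t) cur tot =
            (cur :: (pvGroupLoop t e f).1, tot :: (pvGroupLoop t e f).2) by
        simp [pvGroupLoop, he]]
      rw [ih e f htail]
      simp only [List.map_cons] at *
      rw [pvOfList_cons_of_not_mem cur _ hfresh]
      refine Prod.ext rfl ?_
      simp only [List.map_cons]
      refine congrArg₂ _ ?_ ?_
      · -- head: k = cur
        have h0 : pvSum t cur = 0 := by
          apply pvSum_eq_zero
          intro p hp hpk
          have hmm : (fun p : Int × Int => p.1) p ∈ List.map (fun p : Int × Int => p.1) t :=
            List.mem_map_of_mem hp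
          exact hfresh (List.mem_cons_of_mem _ (hpk ▸ hmm))
        rw [pvSum_cons]
        simp [hlt.ne, h0]
      · -- tail: every k there differs from cur
        apply List.map_congr_left
        intro k hk
        have hkne : k ≠ cur := by
          intro hh
          exact hfresh ((PySem.Set.mem_ofList _ _).1 (hh ▸ hk))
        rw [pvSum_cons]
        by_cases hke : k = e
        · simp [hke, he]
        · simp [hkne, hke]

lemma pvGroup_spec (l : List (Int × Int))
    (h : List.Pairwise (fun a b => a ≤ b) (l.map (fun p => p.1))) :
    pvGroup l =
      (PySem.Set.ofList (l.map (fun p => p.1)),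
       (PySem.Set.ofList (l.map (fun p => p.1))).map (fun k => pvSum l k)) := by
  cases l with
  | nil => rfl
  | cons q t =>
    obtain ⟨e, f⟩ := q
    rw [show pvGroup ((e, f) :: t) = pvGroupLoop t e f from rfl]
    rw [pvGroupLoop_spec t e f (by simpa using h)]
    simp only [List.map_cons]
    refine Prod.ext rfl ?_
    apply List.map_congr_left
    intro k _
    rw [pvSum_cons]

-- ===== VERDICT (by name: the statement is the Claim_ definition above) =====
theorem window_counts_spec : Claim_equal_window_counts := by
  intro seqs flags win _ _
  unfold Spec_window_counts window_counts window_counts_alt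
  set pairs := ((seqs.zip flags).filter (fun p => p.1 != 0)).map
      (fun p => (pvEnd p.1 win, p.2)) with hpairs
  rw [pvFoldA]
  set bins := pairs.foldl (fun d q => d.insert q.1 (d.getD q.1 0 + q.2)) PySem.Dict.empty
    with hbins
  have hkeys : bins.keys = PySem.Set.ofList (pairs.map (fun p => p.1)) := by
    rw [hbins, PySem.Dict.keys_foldl_insert_key pairs (fun q => q.1)
      (fun d q => d.getD q.1 0 + q.2) PySem.Dict.empty]
    simp [PySem.Set.update, PySem.Set.ofList_eq_foldl]
  have hget : ∀ k : Int, bins.getD k 0 = pvSum pairs k := by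
    intro k
    rw [hbins, pvGetD_foldA]
    simp [PySem.Dict.getD_empty]
  have hsp : List.Pairwise (fun a b : Int => a ≤ b)
      ((PySem.List.sorted pairs (fun p => p.1)).map (fun p => p.1)) :=
    (List.pairwise_map).2 (PySem.List.sorted_pairwise pairs (fun p => p.1))
  dsimp only
  rw [pvGroup_spec _ hsp, hkeys]
  have hperm : (PySem.List.sorted pairs (fun p => p.1)).Perm pairs :=
    PySem.List.sorted_perm pairs (fun p => p.1) false
  have hpm : ((PySem.List.sorted pairs (fun p => p.1)).map (fun p => p.1)).Perm
      (pairs.map (fun p => p.1)) := hperm.map _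
  have hkeyeq : PySem.List.sorted (PySem.Set.ofList (pairs.map (fun p => p.1))) (fun x => x)
      = PySem.Set.ofList ((PySem.List.sorted pairs (fun p => p.1)).map (fun p => p.1)) := by
    apply PySem.List.sorted_eq_of_perm_of_pairwise_lt
    · rw [List.perm_ext_iff_of_nodup (PySem.Set.nodup_ofList _) (PySem.Set.nodup_ofList _)]
      intro a
      rw [PySem.Set.mem_ofList, PySem.Set.mem_ofList]
      exact hpm.mem_iff
    · have h1 := hsp.sublist (pvOfList_sublist _)
      have h2 := PySem.Set.nodup_ofList ((PySem.List.sorted pairs (fun p => p.1)).map (fun p => p.1))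
      exact (h1.and h2).imp (fun hab => lt_of_le_of_ne hab.1 hab.2)
  rw [hkeyeq]
  refine Prod.ext rfl ?_
  apply List.map_congr_left
  intro k _
  rw [hget]
  exact ((List.Perm.filter _ hperm.symm).map _).sum_eq
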